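-- pv_equiv track=rewrite | github.com/Cooduck/SZU_Computer_Science_and_Technology_Courses | 人工智能导论/Task1/Task1-代码.py | is_solvable
-- ===== SOURCE A (Python) =====
-- def is_solvable(init_board, target_board):
--     # 计算给定列表中的逆序对数量
--     def count_inversions(flat_list):
--         inversions = 0
--         # 遍历列表中的每个元素
--         for i in range(len(flat_list)):
--             # 比较该元素与后面所有元素
--             for j in range(i + 1, len(flat_list)):
--                 # 只计算非零元素的逆序对
--                 if flat_list[i] != '0' and flat_list[j] != '0' and flat_list[i] > flat_list[j]:
--                     inversions += 1  # 增加逆序对计数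
--         return inversions  # 返回逆序对数量
--
--     # 将初始棋盘和目标棋盘转换为列表
--     initBoard = list(init_board)
--     inversions1 = count_inversions(initBoard)  # 计算初始棋盘的逆序对数量
--
--     targetBoard = list(target_board)
--     inversions2 = count_inversions(targetBoard)  # 计算目标棋盘的逆序对数量
--
--     # 判断逆序对数量的奇偶性
--     if (inversions1 % 2) == (inversions2 % 2):
--         return True  # 如果奇偶性相同，则该问题可解
--     else:
--         return False  # 如果奇偶性不同，则该问题不可解
-- ===== SOURCE B (Python) =====
-- def is_solvable(init_board, target_board):
--     # Count inversions among non-'0' entries with merge sort: O(n log n).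
--     def sort_count(lst):
--         n = len(lst)
--         if n < 2:
--             return lst, 0
--         mid = n // 2
--         left, cl = sort_count(lst[:mid])
--         right, cr = sort_count(lst[mid:])
--         merged = []
--         cross = 0
--         i = j = 0
--         while i < len(left) and j < len(right):
--             if left[i] <= right[j]:
--                 merged.append(left[i])
--                 i += 1
--             else:
--                 cross += len(left) - i
--                 merged.append(right[j])
--                 j += 1
--         merged.extend(left[i:])
--         merged.extend(right[j:])
--         return merged, cl + cr + cross
--
--     def inv_count(board):
--         _, c = sort_count([ch for ch in board if ch != '0'])
--         return c
--
--     return inv_count(init_board) % 2 == inv_count(target_board) % 2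
-- ===== Notes on version B (the rewrite author's own statement) =====
-- stated objective: faster
-- what changed: Replaces the quadratic all-pairs inversion scan with filtering out the zeros once and counting inversions by a merge sort, then comparing parities.
import Mathlib
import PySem

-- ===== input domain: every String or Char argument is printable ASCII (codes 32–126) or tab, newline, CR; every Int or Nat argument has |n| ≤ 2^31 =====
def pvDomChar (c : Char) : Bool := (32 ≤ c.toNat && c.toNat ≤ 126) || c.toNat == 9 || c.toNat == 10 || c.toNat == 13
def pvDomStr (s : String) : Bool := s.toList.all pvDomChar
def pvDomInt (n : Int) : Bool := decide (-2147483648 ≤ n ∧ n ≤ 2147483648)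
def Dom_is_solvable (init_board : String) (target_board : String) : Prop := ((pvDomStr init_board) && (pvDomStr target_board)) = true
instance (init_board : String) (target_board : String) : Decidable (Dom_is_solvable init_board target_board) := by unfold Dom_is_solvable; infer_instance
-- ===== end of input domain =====

-- B replaces A's quadratic all-pairs inversion scan by filtering out zeros and
-- counting inversions with a merge sort (objective: faster, asymptotic).

-- ===== PORT A =====
-- inner helper count_inversions: nested index loops over the flat list
def is_solvable_countInversions (flat_list : List Char) : Int :=
  (PySem.List.pyRange 0 (flat_list.length : Int) 1).foldl (fun inversions i =>
    (PySem.List.pyRange (i + 1) (flat_list.length : Int) 1).foldl (fun inversions j =>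
      if PySem.List.pyGetD flat_list i ' ' ≠ '0' ∧ PySem.List.pyGetD flat_list j ' ' ≠ '0'
          ∧ PySem.List.pyGetD flat_list j ' ' < PySem.List.pyGetD flat_list i ' '
      then inversions + 1 else inversions) inversions) 0

def is_solvable (init_board : String) (target_board : String) : Bool :=
  let initBoard := init_board.toList
  let inversions1 := is_solvable_countInversions initBoard
  let targetBoard := target_board.toList
  let inversions2 := is_solvable_countInversions targetBoard
  if PySem.Int.mod inversions1 2 = PySem.Int.mod inversions2 2 then true else false

-- ===== PORT B =====
-- the merge loop of Source B's sort_count: merges two runs, counting cross inversions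
def is_solvable_bMerge : List Char → List Char → List Char × Nat
  | [], ys => (ys, 0)
  | x :: xs, [] => (x :: xs, 0)
  | x :: xs, y :: ys =>
    if x ≤ y then
      let r := is_solvable_bMerge xs (y :: ys)
      (x :: r.1, r.2)
    else
      let r := is_solvable_bMerge (x :: xs) ys
      (y :: r.1, r.2 + (xs.length + 1))

-- sort_count: lst[:mid] / lst[mid:] are List.take / List.drop (exact: 0 ≤ mid ≤ len)
def is_solvable_bSortCount (l : List Char) : List Char × Nat :=
  if l.length < 2 then (l, 0)
  else
    let mid := l.length / 2
    let L := is_solvable_bSortCount (l.take mid)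
    let R := is_solvable_bSortCount (l.drop mid)
    let m := is_solvable_bMerge L.1 R.1
    (m.1, L.2 + R.2 + m.2)
termination_by l.length
decreasing_by
  · simp only [List.length_take]; omega
  · simp only [List.length_drop]; omega

def is_solvable_bInvCount (board : List Char) : Nat :=
  (is_solvable_bSortCount (board.filter (fun ch => ch ≠ '0'))).2

def is_solvable_alt (init_board : String) (target_board : String) : Bool :=
  is_solvable_bInvCount init_board.toList % 2 == is_solvable_bInvCount target_board.toList % 2

-- ===== PRECONDITION & SPEC =====
def Spec_is_solvable (init_board : String) (target_board : String) (out : Bool) : Prop := out = is_solvable_alt init_board target_board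
instance (init_board : String) (target_board : String) (out : Bool) : Decidable (Spec_is_solvable init_board target_board out) := by unfold Spec_is_solvable; infer_instance

-- ===== CLAIM (what is proved, stated in full; the proofs are below) =====
def Claim_equal_is_solvable : Prop := ∀ (init_board : String) (target_board : String), Dom_is_solvable init_board target_board → Spec_is_solvable init_board target_board (is_solvable init_board target_board)

-- ===== LEMMAS AND PROOFS =====

-- reference inversion count: pairs (i < j) with l[j] < l[i]
def pvInv : List Char → Nat
  | [] => 0
  | a :: t => t.countP (fun b => decide (b < a)) + pvInv t

-- cross inversions between two blocks
def pvCross (xs ys : List Char) : Nat :=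
  (ys.map (fun b => xs.countP (fun a => decide (b < a)))).sum

theorem pvCross_nil (ys : List Char) : pvCross [] ys = 0 := by
  simp [pvCross]

theorem pvCross_cons_right (xs : List Char) (b : Char) (ys : List Char) :
    pvCross xs (b :: ys) = xs.countP (fun a => decide (b < a)) + pvCross xs ys := by
  simp [pvCross]

theorem pvCross_cons_left (x : Char) (xs ys : List Char) :
    pvCross (x :: xs) ys = ys.countP (fun b => decide (b < x)) + pvCross xs ys := by
  induction ys with
  | nil => simp [pvCross]
  | cons b ys ih =>
    simp only [pvCross_cons_right, List.countP_cons, ih]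
    by_cases h : b < x <;> simp [h] <;> omega

theorem pvInv_append (xs ys : List Char) :
    pvInv (xs ++ ys) = pvInv xs + pvInv ys + pvCross xs ys := by
  induction xs with
  | nil => simp [pvInv, pvCross_nil]
  | cons x xs ih =>
    simp only [List.cons_append, pvInv, List.countP_append, ih, pvCross_cons_left]
    omega

theorem pvCross_perm {xs xs' ys ys' : List Char} (h1 : xs.Perm xs') (h2 : ys.Perm ys') :
    pvCross xs ys = pvCross xs' ys' := by
  unfold pvCross
  have hmap : ∀ zs : List Char,
      zs.map (fun b => xs.countP (fun a => decide (b < a)))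
        = zs.map (fun b => xs'.countP (fun a => decide (b < a))) := by
    intro zs
    exact List.map_congr_left (fun b _ => h1.countP_eq _)
  rw [hmap]
  exact (h2.map _).sum_eq

theorem pvMerge_perm (xs ys : List Char) :
    (is_solvable_bMerge xs ys).1.Perm (xs ++ ys) := by
  induction xs, ys using is_solvable_bMerge.induct with
  | case1 ys => simp [is_solvable_bMerge]
  | case2 x xs => simp [is_solvable_bMerge]
  | case3 x xs y ys h ih =>
    simp only [is_solvable_bMerge, if_pos h]
    exact (ih.cons x).trans (by rfl)
  | case4 x xs y ys h ih =>
    simp only [is_solvable_bMerge, if_neg h]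
    refine (ih.cons y).trans ?_
    exact List.Perm.symm (List.perm_middle.symm.trans (by rfl)).symm

theorem pvMerge_sorted {xs ys : List Char} (hx : xs.Pairwise (· ≤ ·)) (hy : ys.Pairwise (· ≤ ·)) :
    (is_solvable_bMerge xs ys).1.Pairwise (· ≤ ·) := by
  induction xs, ys using is_solvable_bMerge.induct with
  | case1 ys => simpa [is_solvable_bMerge] using hy
  | case2 x xs => simpa [is_solvable_bMerge] using hx
  | case3 x xs y ys h ih =>
    simp only [is_solvable_bMerge, if_pos h]
    have hx' := (List.pairwise_cons.mp hx).2
    refine List.pairwise_cons.mpr ⟨?_, ih hx' hy⟩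
    intro b hb
    have hb' : b ∈ xs ++ (y :: ys) := (pvMerge_perm xs (y :: ys)).mem_iff.mp hb
    rcases List.mem_append.mp hb' with h1 | h1
    · exact (List.pairwise_cons.mp hx).1 b h1
    · rcases List.mem_cons.mp h1 with rfl | h2
      · exact h
      · exact le_trans h ((List.pairwise_cons.mp hy).1 b h2)
  | case4 x xs y ys h ih =>
    simp only [is_solvable_bMerge, if_neg h]
    have hy' := (List.pairwise_cons.mp hy).2
    refine List.pairwise_cons.mpr ⟨?_, ih hx hy'⟩
    intro b hb
    have hb' : b ∈ (x :: xs) ++ ys := (pvMerge_perm (x :: xs) ys).mem_iff.mp hb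
    have hyx : y ≤ x := le_of_lt (lt_of_not_ge h)
    rcases List.mem_append.mp hb' with h1 | h1
    · rcases List.mem_cons.mp h1 with rfl | h2
      · exact hyx
      · exact le_trans hyx ((List.pairwise_cons.mp hx).1 b h2)
    · exact (List.pairwise_cons.mp hy).1 b h1

theorem pvMerge_count {xs ys : List Char} (hx : xs.Pairwise (· ≤ ·)) (hy : ys.Pairwise (· ≤ ·)) :
    (is_solvable_bMerge xs ys).2 = pvCross xs ys := by
  induction xs, ys using is_solvable_bMerge.induct with
  | case1 ys => simp [is_solvable_bMerge, pvCross_nil]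
  | case2 x xs => simp [is_solvable_bMerge, pvCross]
  | case3 x xs y ys h ih =>
    simp only [is_solvable_bMerge, if_pos h]
    have hx' := (List.pairwise_cons.mp hx).2
    rw [ih hx' hy, pvCross_cons_left]
    have : (y :: ys).countP (fun b => decide (b < x)) = 0 := by
      rw [List.countP_eq_zero]
      intro b hb
      rcases List.mem_cons.mp hb with rfl | h2
      · simpa using not_lt_of_ge h
      · exact by simpa using not_lt_of_ge (le_trans h ((List.pairwise_cons.mp hy).1 b h2))
    omega
  | case4 x xs y ys h ih =>
    simp only [is_solvable_bMerge, if_neg h]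
    have hy' := (List.pairwise_cons.mp hy).2
    rw [ih hx hy', pvCross_cons_right]
    have hyx : y < x := lt_of_not_ge h
    have : (x :: xs).countP (fun a => decide (y < a)) = xs.length + 1 := by
      rw [List.countP_eq_length.mpr]
      · simp
      · intro a ha
        rcases List.mem_cons.mp ha with rfl | h2
        · simpa using hyx
        · simpa using lt_of_lt_of_le hyx ((List.pairwise_cons.mp hx).1 a h2)
    omega

theorem pvSortCount_eq (l : List Char) (h : ¬ l.length < 2) :
    is_solvable_bSortCount l =
      ((is_solvable_bMerge (is_solvable_bSortCount (l.take (l.length / 2))).1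
          (is_solvable_bSortCount (l.drop (l.length / 2))).1).1,
        (is_solvable_bSortCount (l.take (l.length / 2))).2
          + (is_solvable_bSortCount (l.drop (l.length / 2))).2
          + (is_solvable_bMerge (is_solvable_bSortCount (l.take (l.length / 2))).1
              (is_solvable_bSortCount (l.drop (l.length / 2))).1).2) := by
  rw [is_solvable_bSortCount, if_neg h]

theorem pvSortCount_spec (l : List Char) :
    (is_solvable_bSortCount l).1.Perm l ∧ (is_solvable_bSortCount l).1.Pairwise (· ≤ ·)
      ∧ (is_solvable_bSortCount l).2 = pvInv l := by
  induction l using is_solvable_bSortCount.induct with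
  | case1 l h =>
    rw [is_solvable_bSortCount, if_pos h]
    match l, h with
    | [], _ => exact ⟨List.Perm.refl _, List.Pairwise.nil, rfl⟩
    | [a], _ => exact ⟨List.Perm.refl _, List.pairwise_singleton _ _, by simp [pvInv]⟩
  | case2 l h mid ihL ihR =>
    obtain ⟨pL, sL, cL⟩ := ihL
    obtain ⟨pR, sR, cR⟩ := ihR
    rw [pvSortCount_eq l h]
    refine ⟨?_, pvMerge_sorted sL sR, ?_⟩
    · exact (pvMerge_perm _ _).trans ((pL.append pR).trans (by rw [List.take_append_drop]))
    · have hsplit : pvInv l = pvInv (l.take (l.length / 2)) + pvInv (l.drop (l.length / 2))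
          + pvCross (l.take (l.length / 2)) (l.drop (l.length / 2)) := by
        conv_lhs => rw [← List.take_append_drop (l.length / 2) l]
        exact pvInv_append _ _
      simp only []
      rw [hsplit, pvMerge_count sL sR, pvCross_perm pL pR, cL, cR]

-- A's predicate, restricted to a fixed first element
theorem pv_countP_Q_filter (a : Char) (t : List Char) :
    t.countP (fun b => decide (a ≠ '0' ∧ b ≠ '0' ∧ b < a))
      = if a = '0' then 0 else (t.filter (fun ch => ch ≠ '0')).countP (fun b => decide (b < a)) := by
  by_cases ha : a = '0'
  · simp [ha]
  · rw [if_neg ha, List.countP_filter]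
    apply List.countP_congr
    intro b _
    simp [ha, and_comm]

-- the index-pair sum A computes equals the structural pvInv of the zero-filtered list
theorem pv_sum_eq_invQ (l : List Char) :
    ((List.range l.length).map (fun k =>
        (((l.drop (k + 1)).countP (fun b =>
          decide (l.getD k ' ' ≠ '0' ∧ b ≠ '0' ∧ b < l.getD k ' '))) : Int))).sum
      = (pvInv (l.filter (fun ch => ch ≠ '0')) : Int) := by
  induction l with
  | nil => simp [pvInv]
  | cons a t ih =>
    rw [List.length_cons, List.range_succ_eq_map, List.map_cons, List.map_map, List.sum_cons]
    have htail : ((List.range t.length).map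
        ((fun k => (((a :: t).drop (k + 1)).countP (fun b =>
          decide ((a :: t).getD k ' ' ≠ '0' ∧ b ≠ '0' ∧ b < (a :: t).getD k ' ')) : Int)) ∘ Nat.succ))
        = (List.range t.length).map (fun k => (((t.drop (k + 1)).countP (fun b =>
          decide (t.getD k ' ' ≠ '0' ∧ b ≠ '0' ∧ b < t.getD k ' '))) : Int)) := by
      apply List.map_congr_left
      intro k _
      simp [Function.comp]
    rw [htail, ih]
    simp only [List.drop_succ_cons, List.drop_zero, List.getD_cons_zero]
    rw [pv_countP_Q_filter]
    by_cases ha : a = '0'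
    · simp [ha]
    · simp only [if_neg ha]
      rw [List.filter_cons_of_pos (by simpa using ha)]
      simp [pvInv]

-- A's nested loops compute pvInv of the zero-filtered list
theorem pv_countInversions_eq (l : List Char) :
    is_solvable_countInversions l = (pvInv (l.filter (fun ch => ch ≠ '0')) : Int) := by
  unfold is_solvable_countInversions
  rw [← pv_sum_eq_invQ l]
  rw [PySem.List.foldl_congr_mem' _ _ (fun (inv : Int) (i : Int) => inv
        + (((l.drop (i + 1).toNat).countP (fun b =>
            decide (PySem.List.pyGetD l i ' ' ≠ '0' ∧ b ≠ '0' ∧ b < PySem.List.pyGetD l i ' '))) : Int)) 0 ?_]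
  · rw [PySem.List.pyRange_one]
    rw [List.foldl_map]
    rw [PySem.List.foldl_congr_mem' _ _ (fun (inv : Int) (k : Nat) => inv
          + (((l.drop (k + 1)).countP (fun b =>
              decide (l.getD k ' ' ≠ '0' ∧ b ≠ '0' ∧ b < l.getD k ' '))) : Int)) 0 ?_]
    · rw [PySem.List.foldl_add]
      simp
    · intro k _ acc
      have h1 : ((0 : Int) + (k : Int) + 1).toNat = k + 1 := by omega
      have h2 : PySem.List.pyGetD l ((0 : Int) + (k : Int)) ' ' = l.getD k ' ' := by
        rw [show ((0 : Int) + (k : Int)) = (k : Int) by omega, PySem.List.pyGetD_natCast]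
      rw [h1, h2]
  · intro i hi acc
    have h0 : (0 : Int) ≤ i + 1 := by
      have := (PySem.List.mem_pyRange_one.mp hi).1; omega
    have base := PySem.List.foldl_pyRange_pyGetD' l ' '
      (fun (inversions : Int) (b : Char) =>
        if PySem.List.pyGetD l i ' ' ≠ '0' ∧ b ≠ '0' ∧ b < PySem.List.pyGetD l i ' '
        then inversions + 1 else inversions) acc h0
    exact base.trans (PySem.List.foldl_ite_add_one _ _ _)

theorem pv_alt_inv (s : String) :
    is_solvable_bInvCount s.toList = pvInv (s.toList.filter (fun ch => ch ≠ '0')) := by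
  unfold is_solvable_bInvCount
  exact (pvSortCount_spec _).2.2

-- ===== VERDICT (by name: the statement is the Claim_ definition above) =====
theorem is_solvable_spec : Claim_equal_is_solvable := by
  intro ib tb _
  unfold Spec_is_solvable
  show (if PySem.Int.mod (is_solvable_countInversions ib.toList) 2
          = PySem.Int.mod (is_solvable_countInversions tb.toList) 2 then true else false)
      = (is_solvable_bInvCount ib.toList % 2 == is_solvable_bInvCount tb.toList % 2)
  rw [pv_countInversions_eq, pv_countInversions_eq, pv_alt_inv, pv_alt_inv]
  set m := pvInv (ib.toList.filter (fun ch => ch ≠ '0'))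
  set n := pvInv (tb.toList.filter (fun ch => ch ≠ '0'))
  have hm : PySem.Int.mod (m : Int) 2 = ((m % 2 : Nat) : Int) := PySem.Int.mod_natCast m 2
  have hn : PySem.Int.mod (n : Int) 2 = ((n % 2 : Nat) : Int) := PySem.Int.mod_natCast n 2
  rw [hm, hn]
  by_cases h : m % 2 = n % 2
  · rw [h]
    simp
  · rw [if_neg (by exact_mod_cast h)]
    simp [h]
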